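-- pv_equiv track=rewrite | github.com/SanyogitaPiya/LLM4TDD | RQ1/code1805.py | code1805
-- ===== SOURCE A (Python) =====
-- def code1805(word: str) -> int:
--     # Initialize a set to keep track of unique numeric substrings
--     unique_numbers = set()
--
--     # Iterate through the characters of the input string
--     i = 0
--     while i < len(word):
--         # If the current character is numeric, it's the start of a substring
--         if word[i].isnumeric():
--             # Move to the end of the current numeric substring
--             start = i
--             while i < len(word) and word[i].isnumeric():
--                 i += 1
--             # Add the unique numeric substring (considering leading zeros)
--             unique_numbers.add(word[start:i].lstrip('0') or '0')
--         else:
--             # Move to the next character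
--             i += 1
--
--     # Return the count of unique numeric substrings
--     return len(unique_numbers)
-- ===== SOURCE B (Python) =====
-- def code1805(word: str) -> int:
--     # Replace every non-numeric character with a space, let str.split() find the
--     # maximal numeric runs, and normalize leading zeros in a set comprehension.
--     cleaned = ''.join(c if c.isnumeric() else ' ' for c in word)
--     return len({tok.lstrip('0') or '0' for tok in cleaned.split()})
-- ===== Notes on version B (the rewrite author's own statement) =====
-- stated objective: idiomatic
-- what changed: Replaces the inline two-pointer grouping scan with a transform pass (non-digits become spaces), a library str.split() to obtain the maximal numeric tokens, and a normalizing set comprehension; the C-level split gives a constant-factor speedup.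
import Mathlib
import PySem

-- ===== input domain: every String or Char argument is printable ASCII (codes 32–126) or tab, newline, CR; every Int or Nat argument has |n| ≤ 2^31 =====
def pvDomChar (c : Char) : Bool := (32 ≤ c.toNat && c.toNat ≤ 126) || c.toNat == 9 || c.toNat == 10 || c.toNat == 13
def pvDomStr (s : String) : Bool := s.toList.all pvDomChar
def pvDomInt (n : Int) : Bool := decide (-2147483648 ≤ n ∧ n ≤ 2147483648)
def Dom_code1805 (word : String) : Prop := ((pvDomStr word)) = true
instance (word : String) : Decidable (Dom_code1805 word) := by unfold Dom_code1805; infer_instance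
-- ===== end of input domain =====

-- B replaces A's inline two-pointer grouping scan by a transform pass (non-digits
-- become spaces), a library split() for the maximal numeric tokens, and a
-- normalizing set comprehension (objective: idiomatic; same O(n) cost).
-- On the printable-ASCII domain Dom_, Python's c.isnumeric() is exactly
-- PySem.Chars.isdigit c (no non-ASCII numerics exist in Dom_), used in both ports.

-- ===== PORT A =====

-- tok.lstrip('0') or '0'  (exact: lstrip('0') drops leading '0' characters)
def pvNorm (tok : List Char) : List Char :=
  let t := tok.dropWhile (· == '0')
  if t.isEmpty then ['0'] else t

-- A's inner while loop: consume the numeric run, return (run, remaining chars)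
def code1805_inner : List Char → List Char × List Char
  | [] => ([], [])
  | c :: rest =>
    if PySem.Chars.isdigit c then
      ((c :: (code1805_inner rest).1), (code1805_inner rest).2)
    else ([], c :: rest)

theorem code1805_inner_len (cs : List Char) : (code1805_inner cs).2.length ≤ cs.length := by
  induction cs with
  | nil => simp [code1805_inner]
  | cons c rest ih =>
    simp only [code1805_inner]
    split <;> simp
    omega

-- A's outer while loop over the string, accumulating the set
def code1805_go : List Char → PySem.Set (List Char) → PySem.Set (List Char)
  | [], acc => acc
  | c :: rest, acc =>
    if PySem.Chars.isdigit c then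
      code1805_go (code1805_inner rest).2
        (acc.add (pvNorm (c :: (code1805_inner rest).1)))
    else
      code1805_go rest acc
termination_by cs _ => cs.length
decreasing_by
  · exact Nat.lt_succ_of_le (code1805_inner_len rest)
  · simp

def code1805 (word : String) : Int :=
  ((code1805_go word.toList PySem.Set.empty).length : Int)

-- ===== PORT B =====

def code1805_alt (word : String) : Int :=
  ((PySem.Set.ofList ((PySem.Chars.split₀
      (word.toList.map (fun c => if PySem.Chars.isdigit c then c else ' '))).map pvNorm)).length : Int)

-- ===== PRECONDITION & SPEC =====
def Spec_code1805 (word : String) (out : Int) : Prop := out = code1805_alt word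
instance (word : String) (out : Int) : Decidable (Spec_code1805 word out) := by unfold Spec_code1805; infer_instance

-- ===== CLAIM (what is proved, stated in full; the proofs are below) =====
def Claim_equal_code1805 : Prop := ∀ (word : String), Dom_code1805 word → Spec_code1805 word (code1805 word)

-- ===== LEMMAS AND PROOFS =====

-- the list of maximal digit runs of cs, in order (proof-only helper)
def pvTokens : List Char → List (List Char)
  | [] => []
  | c :: rest =>
    if PySem.Chars.isdigit c then
      (c :: (code1805_inner rest).1) :: pvTokens (code1805_inner rest).2
    else
      pvTokens rest
termination_by cs => cs.length
decreasing_by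
  · exact Nat.lt_succ_of_le (code1805_inner_len rest)
  · simp

-- A's scan is a fold of Set.add over the normalized maximal digit runs
theorem code1805_go_eq (cs : List Char) (acc : PySem.Set (List Char)) :
    code1805_go cs acc = ((pvTokens cs).map pvNorm).foldl PySem.Set.add acc := by
  fun_induction code1805_go cs acc with
  | case1 acc => simp [pvTokens]
  | case2 c rest acc h ih => rw [pvTokens]; simp [h, ih]
  | case3 c rest acc h ih => rw [pvTokens]; simp [h, ih]

theorem isspace_of_isdigit (c : Char) (h : PySem.Chars.isdigit c = true) :
    PySem.Chars.isspace c = false := by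
  revert h
  simp only [PySem.Chars.isdigit, PySem.Chars.isspace, Char.le_def,
    UInt32.le_iff_toNat_le, Char.toNat, Bool.and_eq_true, decide_eq_true_eq,
    Bool.or_eq_false_iff, Bool.and_eq_false_iff, decide_eq_false_iff_not]
  intro h1
  have e0 : '0'.val.toNat = 48 := rfl
  have e9 : '9'.val.toNat = 57 := rfl
  rw [e0, e9] at h1
  omega

-- split₀'s worker on the cleaned string produces exactly the maximal digit runs
theorem split_go_clean (cs : List Char) : ∀ (cur : List Char) (acc : List (List Char)),
    PySem.Chars.split₀.go (cs.map (fun c => if PySem.Chars.isdigit c then c else ' ')) cur acc =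
      if cur.isEmpty then acc.reverse ++ pvTokens cs
      else acc.reverse ++
        (cur.reverse ++ (code1805_inner cs).1) :: pvTokens (code1805_inner cs).2 := by
  induction cs with
  | nil =>
    intro cur acc
    cases cur <;> simp [PySem.Chars.split₀.go, pvTokens, code1805_inner]
  | cons c rest ih =>
    intro cur acc
    by_cases h : PySem.Chars.isdigit c = true
    · simp only [List.map_cons, if_pos h, PySem.Chars.split₀.go,
        isspace_of_isdigit c h, Bool.false_eq_true, if_false]
      rw [ih (c :: cur) acc]
      rw [pvTokens]
      cases cur <;> simp [h, code1805_inner]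
    · have hs : PySem.Chars.isspace ' ' = true := by decide
      simp only [List.map_cons, if_neg h, PySem.Chars.split₀.go, hs, if_true]
      rw [pvTokens]
      cases cur with
      | nil => simp [ih [] acc, h]
      | cons d ds =>
        simp only [List.isEmpty_cons, Bool.false_eq_true, if_false]
        rw [ih [] (((d :: ds).reverse) :: acc)]
        simp [code1805_inner, h, pvTokens]

theorem split₀_clean (cs : List Char) :
    PySem.Chars.split₀ (cs.map (fun c => if PySem.Chars.isdigit c then c else ' ')) =
      pvTokens cs := by
  rw [PySem.Chars.split₀, split_go_clean cs [] []]
  simp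

-- ===== VERDICT (by name: the statement is the Claim_ definition above) =====
theorem code1805_spec : Claim_equal_code1805 := by
  intro word _
  unfold Spec_code1805 code1805 code1805_alt
  rw [code1805_go_eq, split₀_clean]
  rfl
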